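-- pv_equiv track=rewrite | github.com/Allen19990307/PythonDeveloper | BasicLearning/BasicAlgorithms.py | find__left__repeat__num
-- ===== SOURCE A (Python) =====
-- def find__left__repeat__num(nums):
--     res = []
--     for i in range(len(nums)):
--         find = -1
--         for j in range(i):
--             if nums[j] == nums[i]:
--                 find = j
--                 break
--         res.append(find)
--     return res
-- ===== SOURCE B (Python) =====
-- def find__left__repeat__num(nums):
--     first = {}
--     res = []
--     for i, x in enumerate(nums):
--         res.append(first.get(x, -1))
--         if x not in first:
--             first[x] = i
--     return res
-- ===== Notes on version B (the rewrite author's own statement) =====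
-- stated objective: faster
-- what changed: Replaces the quadratic inner rescan of all earlier elements by a single pass that keeps a hash map from value to its first index.
import Mathlib
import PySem

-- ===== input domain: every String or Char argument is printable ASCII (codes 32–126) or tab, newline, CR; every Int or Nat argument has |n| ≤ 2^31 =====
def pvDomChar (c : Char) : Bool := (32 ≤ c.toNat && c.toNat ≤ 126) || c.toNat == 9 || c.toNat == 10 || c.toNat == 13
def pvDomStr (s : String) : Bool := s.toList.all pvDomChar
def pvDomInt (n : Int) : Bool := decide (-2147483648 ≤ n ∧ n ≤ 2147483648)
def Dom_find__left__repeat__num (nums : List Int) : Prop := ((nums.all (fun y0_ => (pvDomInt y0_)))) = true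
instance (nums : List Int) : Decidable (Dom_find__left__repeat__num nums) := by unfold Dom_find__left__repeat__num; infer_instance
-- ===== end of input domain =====

-- B replaces A's quadratic rescan of all earlier elements by a single pass with a
-- hash map value → first index (objective: faster, asymptotic).

-- ===== PORT A =====
-- inner loop: for j in range(i): if nums[j]==v: find=j; break  (scan of the prefix before i)
def pvInnerA (xs : List Int) (v : Int) (j : Int) : Int :=
  match xs with
  | [] => -1
  | x :: t => if x = v then j else pvInnerA t v (j + 1)

-- outer loop over i; `seen` is nums[:i], current element x = nums[i]
def pvGoA (seen : List Int) (rest : List Int) : List Int :=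
  match rest with
  | [] => []
  | x :: t => pvInnerA seen x 0 :: pvGoA (seen ++ [x]) t

def find__left__repeat__num (nums : List Int) : List Int := pvGoA [] nums

-- ===== PORT B =====
-- single pass: res.append(first.get(x,-1)); if x not in first: first[x]=i
def pvGoB (d : PySem.Dict Int Int) (i : Int) (rest : List Int) : List Int :=
  match rest with
  | [] => []
  | x :: t => d.getD x (-1) :: pvGoB (if d.contains x then d else d.insert x i) (i + 1) t

def find__left__repeat__num_alt (nums : List Int) : List Int := pvGoB PySem.Dict.empty 0 nums

-- ===== PRECONDITION & SPEC =====
def Spec_find__left__repeat__num (nums : List Int) (out : List Int) : Prop := out = find__left__repeat__num_alt nums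
instance (nums : List Int) (out : List Int) : Decidable (Spec_find__left__repeat__num nums out) := by unfold Spec_find__left__repeat__num; infer_instance

-- ===== CLAIM (what is proved, stated in full; the proofs are below) =====
def Claim_equal_find__left__repeat__num : Prop := ∀ (nums : List Int), Dom_find__left__repeat__num nums → Spec_find__left__repeat__num nums (find__left__repeat__num nums)

-- ===== LEMMAS AND PROOFS =====

-- a found index is ≥ the starting counter
theorem pvInnerA_ge (xs : List Int) (v : Int) (j : Int) :
    pvInnerA xs v j = -1 ∨ j ≤ pvInnerA xs v j := by
  induction xs generalizing j with
  | nil => left; rfl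
  | cons x t ih =>
    simp only [pvInnerA]
    split
    · right; omega
    · rcases ih (j + 1) with h | h
      · left; exact h
      · right; omega

-- appending one element to the scanned prefix
theorem pvInnerA_append (xs : List Int) (x v : Int) (j : Int) (hj : 0 ≤ j) :
    pvInnerA (xs ++ [x]) v j =
      if pvInnerA xs v j = -1 then (if x = v then j + xs.length else -1)
      else pvInnerA xs v j := by
  induction xs generalizing j with
  | nil => simp [pvInnerA]
  | cons y t ih =>
    simp only [List.cons_append, pvInnerA]
    by_cases hy : y = v
    · rcases pvInnerA_ge (y :: t) v j with h | h
      · simp [pvInnerA, hy] at h; omega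
      · simp [hy]; omega
    · simp only [hy, if_false]
      rw [ih (j + 1) (by omega)]
      simp [List.length_cons]
      split
      · split <;> [skip; rfl]
        omega
      · rfl

-- loop invariant: d encodes the first-occurrence map of `seen`, i = |seen|
theorem pvGo_eq (rest : List Int) : ∀ (seen : List Int) (d : PySem.Dict Int Int) (i : Int),
    i = (seen.length : Int) →
    (∀ v, d.getD v (-1) = pvInnerA seen v 0) →
    (∀ v, d.contains v = true ↔ pvInnerA seen v 0 ≠ -1) →
    pvGoA seen rest = pvGoB d i rest := by
  induction rest with
  | nil => intro _ _ _ _ _ _; rfl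
  | cons x t ih =>
    intro seen d i hi hval hmem
    simp only [pvGoA, pvGoB, hval x]
    congr 1
    by_cases hc : d.contains x = true
    · have hfound := (hmem x).mp hc
      simp only [hc, if_true]
      refine ih (seen ++ [x]) d (i + 1) (by simp [hi]) ?_ ?_
      · intro v
        rw [pvInnerA_append seen x v 0 le_rfl]
        by_cases h1 : pvInnerA seen v 0 = -1
        · have hvx : x ≠ v := by intro h; exact hfound (h ▸ h1)
          simp [h1, hvx, hval v]
        · simp [h1, hval v]
      · intro v
        rw [pvInnerA_append seen x v 0 le_rfl]
        by_cases h1 : pvInnerA seen v 0 = -1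
        · have hvx : x ≠ v := by intro h; exact hfound (h ▸ h1)
          simp [h1, hvx, hmem v]
        · simp [h1, hmem v]
    · have hnot : pvInnerA seen x 0 = -1 := by
        by_contra h; exact hc ((hmem x).mpr h)
      simp only [hc, if_false]
      refine ih (seen ++ [x]) (d.insert x i) (i + 1) (by simp [hi]) ?_ ?_
      · intro v
        rw [pvInnerA_append seen x v 0 le_rfl, PySem.Dict.getD_insert]
        by_cases hvx : v = x
        · subst hvx; simp [hnot, hi]
        · have hxv : x ≠ v := fun h => hvx h.symm
          simp [hvx, hxv, hval v]
      · intro v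
        rw [pvInnerA_append seen x v 0 le_rfl, PySem.Dict.contains_insert]
        by_cases hvx : v = x
        · subst hvx
          simp only [hnot, if_true, if_pos rfl]
          constructor
          · intro _ h; omega
          · intro _; simp
        · have hxv : x ≠ v := fun h => hvx h.symm
          by_cases h1 : pvInnerA seen v 0 = -1 <;>
            simp [h1, hxv, hvx, hmem v]

-- ===== VERDICT (by name: the statement is the Claim_ definition above) =====
theorem find__left__repeat__num_spec : Claim_equal_find__left__repeat__num := by
  intro nums _
  unfold Spec_find__left__repeat__num find__left__repeat__num find__left__repeat__num_alt
  exact pvGo_eq nums [] PySem.Dict.empty 0 rfl (fun v => by simp [pvInnerA])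
    (fun v => by simp [pvInnerA])
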